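-- pv_equiv track=rewrite | github.com/oss-roettger/HR_Encoder | w_utilities.py | tapeTable
-- ===== SOURCE A (Python) =====
-- def tapeTable(w_tape,no_col=5):
--     table,row,col=[],[],0
--     fillup=[None]*int(no_col-len(w_tape)%no_col)
--     if len(fillup)==no_col:
--         fillup=[]
--     for w in (w_tape+fillup):
--         col+=1
--         row.append(w)
--         if col>=no_col:
--             table.append(row)
--             row,col=[],0
--     return table
-- ===== SOURCE B (Python) =====
-- def tapeTable(w_tape, no_col=5):
--     rows = [w_tape[i:i + no_col] for i in range(0, len(w_tape), no_col)]
--     if rows and len(rows[-1]) < no_col: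
--         rows[-1] = rows[-1] + [None] * (no_col - len(rows[-1]))
--     return rows
-- ===== Notes on version B (the rewrite author's own statement) =====
-- stated objective: simpler
-- what changed: B slices the tape directly into chunks of no_col and pads only the last short row, replacing A's pre-computed fill-up concatenation and per-element column counter loop (bulk slicing instead of per-element appends); Pre_ restricts to no_col >= 1, the natural domain of a column count (A raises ZeroDivisionError at no_col = 0, and for negative no_col no table layout is specified and the two programs disagree).
-- outside the precondition, e.g. on tapeTable([1], -2): A returns [[1]], B returns []; on tapeTable([1, 2], 0): A raises ZeroDivisionError, B raises ValueError
import Mathlib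
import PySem

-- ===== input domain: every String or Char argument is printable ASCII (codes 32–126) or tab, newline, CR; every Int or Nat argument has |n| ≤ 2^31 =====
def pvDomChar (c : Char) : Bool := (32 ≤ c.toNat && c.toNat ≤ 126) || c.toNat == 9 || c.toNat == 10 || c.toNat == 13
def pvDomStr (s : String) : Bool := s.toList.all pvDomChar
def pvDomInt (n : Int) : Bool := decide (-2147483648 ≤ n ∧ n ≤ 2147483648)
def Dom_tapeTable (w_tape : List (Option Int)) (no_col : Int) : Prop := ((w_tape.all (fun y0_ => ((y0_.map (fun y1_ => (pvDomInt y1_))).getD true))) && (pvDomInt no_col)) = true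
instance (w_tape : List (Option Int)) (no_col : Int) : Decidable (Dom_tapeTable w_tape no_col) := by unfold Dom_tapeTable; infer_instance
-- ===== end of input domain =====

-- B replaces A's fill-up concatenation and per-element column counter by direct chunk slicing,
-- padding only the last short row (objective: simpler).

-- ===== PORT A =====
-- the body of A's for-loop: col += 1; row.append(w); if col >= no_col: table.append(row); row, col = [], 0
def stepA (no_col : Int) (st : List (List (Option Int)) × List (Option Int) × Int) (w : Option Int) :
    List (List (Option Int)) × List (Option Int) × Int :=
  if no_col ≤ st.2.2 + 1 then (st.1 ++ [st.2.1 ++ [w]], ([] : List (Option Int)), (0 : Int))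
  else (st.1, st.2.1 ++ [w], st.2.2 + 1)

def tapeTable (w_tape : List (Option Int)) (no_col : Int) : List (List (Option Int)) :=
  let fillup : List (Option Int) :=
    List.replicate (no_col - PySem.Int.mod (w_tape.length : Int) no_col).toNat none
  let fillup2 := if (fillup.length : Int) = no_col then ([] : List (Option Int)) else fillup
  ((w_tape ++ fillup2).foldl (stepA no_col) ([], [], 0)).1

-- ===== PORT B =====
def tapeTable_alt (w_tape : List (Option Int)) (no_col : Int) : List (List (Option Int)) :=
  let rows := (PySem.List.pyRange 0 (w_tape.length : Int) no_col).map
      (fun i => PySem.List.slice w_tape (some i) (some (i + no_col)))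
  match rows.getLast? with
  | none => rows
  | some last =>
      if (last.length : Int) < no_col then
        rows.dropLast ++ [last ++ List.replicate (no_col - (last.length : Int)).toNat none]
      else rows

-- ===== PRECONDITION & SPEC =====
-- Pre_ restricts to no_col ≥ 1, the natural domain of a column count: A raises
-- ZeroDivisionError at no_col = 0, and for negative no_col no table layout is specified
-- (the two programs disagree there; see the cites in claim.json).
def Pre_tapeTable (w_tape : List (Option Int)) (no_col : Int) : Prop := 1 ≤ no_col
instance (w_tape : List (Option Int)) (no_col : Int) : Decidable (Pre_tapeTable w_tape no_col) := by
  unfold Pre_tapeTable; infer_instance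

def pvWitness_tapeTable : List (Option Int) × Int := ([some 1, none, some 2], 2)

def Spec_tapeTable (w_tape : List (Option Int)) (no_col : Int) (out : List (List (Option Int))) : Prop :=
  out = tapeTable_alt w_tape no_col
instance (w_tape : List (Option Int)) (no_col : Int) (out : List (List (Option Int))) :
    Decidable (Spec_tapeTable w_tape no_col out) := by unfold Spec_tapeTable; infer_instance

-- ===== CLAIM (what is proved, stated in full; the proofs are below) =====
def Claim_equal_tapeTable : Prop := ∀ (w_tape : List (Option Int)) (no_col : Int),
  Dom_tapeTable w_tape no_col → Pre_tapeTable w_tape no_col →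
  Spec_tapeTable w_tape no_col (tapeTable w_tape no_col)

-- ===== LEMMAS AND PROOFS =====

-- the common shape: split a list into chunks of n (last chunk possibly short)
def chunks (n : Nat) (l : List (Option Int)) : List (List (Option Int)) :=
  if h : n = 0 ∨ l = [] then [] else l.take n :: chunks n (l.drop n)
termination_by l.length
decreasing_by
  rw [not_or] at h
  have h1 : 0 < l.length := List.length_pos_iff.mpr h.2
  have h2 : 0 < n := Nat.pos_of_ne_zero h.1
  simp only [List.length_drop]; omega

lemma chunks_nil (n : Nat) : chunks n [] = [] := by rw [chunks]; simp

lemma chunks_cons (n : Nat) (l : List (Option Int)) (hn : n ≠ 0) (hl : l ≠ []) :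
    chunks n l = l.take n :: chunks n (l.drop n) := by
  rw [chunks]; simp [hn, hl]

lemma chunks_ne_nil (n : Nat) (l : List (Option Int)) (hn : n ≠ 0) (hl : l ≠ []) :
    chunks n l ≠ [] := by
  rw [chunks_cons n l hn hl]; simp

-- A's loop, run over a block that exactly completes the current row
lemma foldA_part (n : Nat) (b : List (Option Int)) (rest row : List (Option Int))
    (t : List (List (Option Int))) (hb : b ≠ []) (h : row.length + b.length = n) :
    (b ++ rest).foldl (stepA (n : Int)) (t, row, (row.length : Int)) =
    rest.foldl (stepA (n : Int)) (t ++ [row ++ b], [], 0) := by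
  induction b generalizing row with
  | nil => exact absurd rfl hb
  | cons x b ih =>
    cases b with
    | nil =>
      have hc : ((n : Int) ≤ (row.length : Int) + 1) := by
        simp only [List.length_cons, List.length_nil] at h; omega
      simp only [List.cons_append, List.nil_append, List.foldl_cons, stepA, hc, if_pos]
    | cons y b' =>
      have hc : ¬ ((n : Int) ≤ (row.length : Int) + 1) := by
        simp only [List.length_cons] at h; omega
      simp only [List.cons_append, List.foldl_cons, stepA, hc, if_neg, not_false_iff]
      have hlen : (row ++ [x]).length + (y :: b').length = n := by
        simp only [List.length_append, List.length_cons, List.length_nil] at h ⊢; omega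
      have h2 := ih (row := row ++ [x]) (by simp) hlen
      simp only [stepA, List.cons_append, List.append_assoc,
        List.length_append, List.length_cons, List.length_nil, List.foldl_cons] at h2 ⊢
      push_cast at h2 ⊢
      convert h2 using 2

-- A's loop on a list whose length is a multiple of n produces exactly the chunks
lemma foldA_full (n : Nat) (hn : 1 ≤ n) (P : List (Option Int)) (t : List (List (Option Int)))
    (hd : n ∣ P.length) :
    P.foldl (stepA (n : Int)) (t, [], 0) = (t ++ chunks n P, [], 0) := by
  rcases eq_or_ne P [] with h | h
  · subst h; simp [chunks_nil]
  · have hlen : 0 < P.length := List.length_pos_iff.mpr h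
    have hnP : n ≤ P.length := Nat.le_of_dvd hlen hd
    have htk : P.take n ≠ [] := by
      simp only [ne_eq, List.take_eq_nil_iff, not_or]
      exact ⟨by omega, h⟩
    have hpart := foldA_part n (P.take n) (P.drop n) [] t htk (by simp; omega)
    simp only [List.length_nil, Nat.cast_zero, List.nil_append] at hpart
    conv_lhs => rw [← List.take_append_drop n P]
    rw [hpart]
    have hd' : n ∣ (P.drop n).length := by
      simp only [List.length_drop]
      exact Nat.dvd_sub hd (dvd_refl n)
    rw [foldA_full n hn (P.drop n) (t ++ [P.take n]) hd']
    rw [chunks_cons n P (by omega) h]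
    simp
termination_by P.length
decreasing_by simp only [List.length_drop]; omega

-- B's chunk comprehension, in closed range form
lemma slices_eq_chunks (n : Nat) (hn : 1 ≤ n) (q : Nat) (l : List (Option Int))
    (h1 : l.length ≤ q * n) (h2 : q * n < l.length + n) :
    (List.range q).map (fun k => (l.drop (n * k)).take n) = chunks n l := by
  induction q generalizing l with
  | zero =>
    have h0 : l = [] := List.eq_nil_of_length_eq_zero (by simpa using h1)
    subst h0; simp [chunks_nil]
  | succ q ih =>
    have hs : (q + 1) * n = q * n + n := by ring
    rw [hs] at h1 h2
    have hqn : q * n < l.length := by omega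
    have hl : l ≠ [] := by
      intro hc; subst hc; simp at hqn
    rw [List.range_succ_eq_map]
    simp only [List.map_cons, List.map_map, Nat.mul_zero, List.drop_zero]
    rw [chunks_cons n l (by omega) hl]
    congr 1
    have heq : ∀ k ∈ List.range q, ((fun k => (l.drop (n * k)).take n) ∘ Nat.succ) k
        = (fun k => (((l.drop n).drop (n * k)).take n)) k := by
      intro k _
      simp only [Function.comp_apply, Nat.mul_succ]
      rw [List.drop_drop]
      congr 2
      omega
    rw [List.map_congr_left heq]
    apply ih
    · simp only [List.length_drop]; omega
    · simp only [List.length_drop]; omega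

-- B's row list equals chunks
lemma rows_eq_chunks (n : Nat) (hn : 1 ≤ n) (l : List (Option Int)) :
    (PySem.List.pyRange 0 (l.length : Int) (n : Int)).map
      (fun i => PySem.List.slice l (some i) (some (i + (n : Int)))) = chunks n l := by
  rw [PySem.List.pyRange_of_pos 0 (l.length : Int) (by exact_mod_cast hn)]
  rcases Nat.eq_zero_or_pos l.length with hL | hL
  · have hl : l = [] := List.eq_nil_of_length_eq_zero hL
    subst hl
    simp [chunks_nil]
  · have hlt : (0 : Int) < (l.length : Int) := by exact_mod_cast hL
    rw [if_pos hlt]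
    set q := (l.length + n - 1) / n with hqdef
    have hcast : (((l.length : Int) - 0 + (n : Int) - 1) / (n : Int)).toNat = q := by
      have h3 : ((l.length : Int) - 0 + (n : Int) - 1) = ((l.length + n - 1 : Nat) : Int) := by
        omega
      rw [h3]
      have h4 : ((l.length + n - 1 : Nat) : Int) / ((n : Nat) : Int)
          = (((l.length + n - 1) / n : Nat) : Int) := by
        exact_mod_cast rfl
      rw [h4, Int.toNat_natCast]
    rw [hcast, List.map_map]
    have hub : l.length ≤ q * n := by
      have hlow := Nat.lt_div_mul_add (a := l.length + n - 1) (b := n) (by omega)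
      rw [← hqdef] at hlow
      omega
    have hlb : q * n < l.length + n := by
      have := Nat.div_mul_le_self (l.length + n - 1) n
      rw [← hqdef] at this
      omega
    rw [← slices_eq_chunks n hn q l hub hlb]
    apply List.map_congr_left
    intro k _
    simp only [Function.comp_apply]
    have h0 : ((0 : Int) + (n : Int) * (k : Int)) = ((n * k : Nat) : Int) := by push_cast; ring
    rw [h0, PySem.List.slice_natCast_add]

-- last-row padding, as B performs it (nat form)
def padLast (n : Nat) (rows : List (List (Option Int))) : List (List (Option Int)) :=
  match rows.getLast? with
  | none => rows
  | some last =>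
      if last.length < n then rows.dropLast ++ [last ++ List.replicate (n - last.length) none]
      else rows

lemma padLast_cons (n : Nat) (c : List (Option Int)) (rows : List (List (Option Int)))
    (h : rows ≠ []) : padLast n (c :: rows) = c :: padLast n rows := by
  obtain ⟨r, rs, rfl⟩ := List.exists_cons_of_ne_nil h
  unfold padLast
  rw [List.getLast?_cons_cons]
  cases hlast : (r :: rs).getLast? with
  | none => simp at hlast
  | some last =>
    simp only
    split_ifs with hlt
    · rw [List.dropLast_cons_of_ne_nil (show (r :: rs) ≠ [] by simp)]
      simp
    · rfl

lemma padLast_chunks (n : Nat) (hn : 1 ≤ n) (l : List (Option Int)) :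
    padLast n (chunks n l) = chunks n (l ++ List.replicate ((n - l.length % n) % n) none) := by
  rcases eq_or_ne l [] with rfl | hl
  · simp [chunks_nil, padLast, Nat.mod_self]
  · have hL : 0 < l.length := List.length_pos_iff.mpr hl
    rcases lt_trichotomy l.length n with hlt | heq | hgt
    · -- 0 < L < n : single short chunk, padded
      have hmod : l.length % n = l.length := Nat.mod_eq_of_lt hlt
      have hpad : (n - l.length % n) % n = n - l.length := by
        rw [hmod]; exact Nat.mod_eq_of_lt (by omega)
      rw [hpad, chunks_cons n l (by omega) hl,
          List.drop_eq_nil_of_le (by omega), chunks_nil,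
          List.take_of_length_le (by omega)]
      have hne : l ++ List.replicate (n - l.length) (none : Option Int) ≠ [] := by
        simp [hl]
      rw [chunks_cons n _ (by omega) hne,
          List.take_of_length_le (by simp; omega),
          List.drop_eq_nil_of_le (by simp; omega), chunks_nil]
      unfold padLast
      simp [hlt]
    · -- L = n : single full chunk, unchanged
      have hmod : l.length % n = 0 := by rw [heq]; exact Nat.mod_self n
      rw [hmod, Nat.sub_zero, Nat.mod_self, List.replicate_zero, List.append_nil,
          chunks_cons n l (by omega) hl,
          List.drop_eq_nil_of_le (by omega), chunks_nil,
          List.take_of_length_le (by omega)]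
      unfold padLast
      simp [heq]
    · -- L > n : first chunk is full, recurse on the rest
      have hdne : l.drop n ≠ [] := by
        intro hc
        have := congrArg List.length hc
        simp only [List.length_drop, List.length_nil] at this
        omega
      have hcne : chunks n (l.drop n) ≠ [] := chunks_ne_nil n _ (by omega) hdne
      rw [chunks_cons n l (by omega) hl, padLast_cons n _ _ hcne,
          padLast_chunks n hn (l.drop n)]
      have hmodeq : (l.drop n).length % n = l.length % n := by
        rw [List.length_drop]
        conv_rhs => rw [← Nat.sub_add_cancel (le_of_lt hgt), Nat.add_mod_right]
      rw [hmodeq]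
      have hne2 : l ++ List.replicate ((n - l.length % n) % n) (none : Option Int) ≠ [] := by
        simp [hl]
      rw [chunks_cons n _ (by omega) hne2,
          List.take_append_of_le_length (by omega),
          List.drop_append_of_le_length (by omega)]
termination_by l.length
decreasing_by simp only [List.length_drop]; omega

-- A reduces to chunks of the padded tape
lemma A_eq_chunks (n : Nat) (hn : 1 ≤ n) (w : List (Option Int)) :
    tapeTable w (n : Int) = chunks n (w ++ List.replicate ((n - w.length % n) % n) none) := by
  unfold tapeTable
  simp only [PySem.Int.mod_natCast]
  have hmlt : w.length % n < n := Nat.mod_lt _ (by omega)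
  have ht : ((n : Int) - ((w.length % n : Nat) : Int)).toNat = n - w.length % n := by omega
  rw [ht]
  by_cases h0 : w.length % n = 0
  · rw [if_pos (by simp [h0])]
    rw [h0, Nat.sub_zero, Nat.mod_self, List.replicate_zero, List.append_nil]
    rw [foldA_full n hn w [] (Nat.dvd_of_mod_eq_zero h0)]
    simp
  · rw [if_neg (by simp; omega)]
    have hpad : (n - w.length % n) % n = n - w.length % n := Nat.mod_eq_of_lt (by omega)
    rw [hpad]
    have hdvd : n ∣ (w ++ List.replicate (n - w.length % n) (none : Option Int)).length := by
      apply Nat.dvd_of_mod_eq_zero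
      simp only [List.length_append, List.length_replicate]
      rw [Nat.add_mod, hpad]
      have e3 : w.length % n + (n - w.length % n) = n := by omega
      rw [e3, Nat.mod_self]
    rw [foldA_full n hn _ [] hdvd]
    simp

-- B reduces to padLast of the chunks of the unpadded tape
lemma B_eq_padLast (n : Nat) (hn : 1 ≤ n) (w : List (Option Int)) :
    tapeTable_alt w (n : Int) = padLast n (chunks n w) := by
  unfold tapeTable_alt padLast
  rw [rows_eq_chunks n hn w]
  cases hlast : (chunks n w).getLast? with
  | none => simp only [hlast]
  | some last =>
    simp only [hlast]
    by_cases hlt : last.length < n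
    · rw [if_pos (show ((last.length : Int) < (n : Int)) by exact_mod_cast hlt), if_pos hlt]
      have heq2 : ((n : Int) - (last.length : Int)).toNat = n - last.length := by omega
      rw [heq2]
    · rw [if_neg (show ¬ ((last.length : Int) < (n : Int)) by exact_mod_cast hlt), if_neg hlt]

-- ===== VERDICT (by name: the statement is the Claim_ definition above) =====
theorem tapeTable_spec : Claim_equal_tapeTable := by
  intro w no_col _ hpre
  unfold Pre_tapeTable at hpre
  unfold Spec_tapeTable
  have hn1 : 1 ≤ no_col.toNat := by omega
  rw [show no_col = ((no_col.toNat : Nat) : Int) by omega]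
  rw [A_eq_chunks _ hn1, B_eq_padLast _ hn1, padLast_chunks _ hn1]
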